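-- pv_equiv track=rewrite | github.com/sachins301/BeingBetter | src/main/python/MinimumNumberOfFoodBucketsToFeedTheHamsters_2086.py | minimumBuckets
-- ===== SOURCE A (Python) =====
-- def minimumBuckets(hamsters: str) -> int:
--     res = 0
--     hamsters = list(hamsters)
--     for i in range(len(hamsters)):
--         if hamsters[i] == '.' or hamsters[i] == 'B':
--             continue
--         if i > 0 and hamsters[i - 1] == 'B':
--             continue
--         if i + 1 < len(hamsters) and hamsters[i + 1] == '.':
--             hamsters[i + 1] = 'B'
--             res += 1
--         elif i > 0 and hamsters[i - 1] == '.':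
--             hamsters[i - 1] = 'B'
--             res += 1
--         else:
--             return -1
--     return res
-- ===== SOURCE B (Python) =====
-- def minimumBuckets(hamsters: str) -> int:
--     # Staged pipeline: normalize to the 3-symbol alphabet {H, ., B}, test
--     # feasibility positionally, then count buckets by string rewriting:
--     # hamsters already fed by a given bucket are masked out ('BH' -> 'B!')
--     # and each shared-bucket triple 'H.H' collapses to one marker 'X';
--     # the answer is #lone hamsters + #shared pairs.
--     s = ''.join(c if c in '.B' else 'H' for c in hamsters)
--     n = len(s)
--     if any(c == 'H' and (i == 0 or s[i - 1] == 'H') and (i == n - 1 or s[i + 1] != '.')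
--            for i, c in enumerate(s)):
--         return -1
--     t = s.replace('BH', 'B!').replace('H.H', 'X')
--     return t.count('H') + t.count('X')
-- ===== Notes on version B (the rewrite author's own statement) =====
-- stated objective: alternative
-- what changed: Replaces A's in-place greedy simulation (indexed loop mutating a char list with early return) by a staged pipeline: normalize to {H,.,B}, a positional feasibility test, then count buckets by string rewriting ('BH'->'B!' masks pre-fed hamsters, each shared triple 'H.H' collapses to one 'X') and summing counts.
import Mathlib
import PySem

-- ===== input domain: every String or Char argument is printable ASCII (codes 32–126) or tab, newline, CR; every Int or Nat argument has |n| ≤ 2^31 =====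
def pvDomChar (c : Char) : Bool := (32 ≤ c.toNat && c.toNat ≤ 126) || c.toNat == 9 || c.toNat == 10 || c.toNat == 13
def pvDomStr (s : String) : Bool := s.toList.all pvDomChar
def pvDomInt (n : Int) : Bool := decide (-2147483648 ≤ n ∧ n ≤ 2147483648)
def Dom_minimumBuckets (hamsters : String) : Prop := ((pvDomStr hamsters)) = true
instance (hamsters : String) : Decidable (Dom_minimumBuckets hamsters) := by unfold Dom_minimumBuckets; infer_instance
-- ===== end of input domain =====

-- B replaces A's in-place greedy simulation by a staged pipeline (normalize,
-- positional feasibility test, count by string rewriting); objective: alternative.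

-- ===== PORT A =====
-- A: indexed loop over a mutable list of chars; early return -1 via the last branch.
def loopA (l : List Char) (i : Nat) (res : Int) : Int :=
  if h : i < l.length then
    if l.getD i ' ' = '.' ∨ l.getD i ' ' = 'B' then loopA l (i + 1) res
    else if 0 < i ∧ l.getD (i - 1) ' ' = 'B' then loopA l (i + 1) res
    else if i + 1 < l.length ∧ l.getD (i + 1) ' ' = '.' then
      loopA (l.set (i + 1) 'B') (i + 1) (res + 1)
    else if 0 < i ∧ l.getD (i - 1) ' ' = '.' then
      loopA (l.set (i - 1) 'B') (i + 1) (res + 1)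
    else -1
  else res
termination_by l.length - i
decreasing_by all_goals simp_all; omega

def minimumBuckets (hamsters : String) : Int := loopA hamsters.toList 0 0

-- ===== PORT B =====
-- B: normalize to {H,.,B}; return -1 if some hamster has no feedable neighbour;
-- otherwise mask 'BH'->'B!', collapse 'H.H'->'X', and count 'H' plus 'X'.
def minimumBuckets_alt (hamsters : String) : Int :=
  let s : List Char := hamsters.toList.map (fun c => if c = '.' ∨ c = 'B' then c else 'H')
  let n : Nat := s.length
  if (PySem.List.enumerate s 0).any (fun ic =>
        ic.2 == 'H' && (ic.1 == 0 || PySem.List.pyGetD s (ic.1 - 1) ' ' == 'H')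
          && (ic.1 == (n : Int) - 1 || !(PySem.List.pyGetD s (ic.1 + 1) ' ' == '.')))
  then -1
  else
    let t := PySem.Chars.replace (PySem.Chars.replace s ['B', 'H'] ['B', '!']) ['H', '.', 'H'] ['X']
    (PySem.Chars.count t ['H'] : Int) + (PySem.Chars.count t ['X'] : Int)

-- ===== PRECONDITION & SPEC =====
def Spec_minimumBuckets (hamsters : String) (out : Int) : Prop := out = minimumBuckets_alt hamsters
instance (hamsters : String) (out : Int) : Decidable (Spec_minimumBuckets hamsters out) := by unfold Spec_minimumBuckets; infer_instance

-- ===== CLAIM (what is proved, stated in full; the proofs are below) =====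
def Claim_equal_minimumBuckets : Prop := ∀ (hamsters : String), Dom_minimumBuckets hamsters → Spec_minimumBuckets hamsters (minimumBuckets hamsters)

-- ===== LEMMAS AND PROOFS =====

-- Proof-internal bridge: a pure one-pass state machine equivalent to A's loop
-- (`left` = effective char of the previous cell, `pend` = current cell holds a
-- just-placed bucket).
def loopB (s : List Char) (left : Option Char) (pend : Bool) (res : Int) : Int :=
  match s with
  | [] => res
  | c :: rest =>
    let eff := if pend then 'B' else c
    if eff = '.' ∨ eff = 'B' ∨ left = some 'B' then loopB rest (some eff) false res
    else if rest.head? = some '.' then loopB rest (some eff) true (res + 1)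
    else if left = some '.' then loopB rest (some eff) false (res + 1)
    else -1

-- normalization to the 3-symbol alphabet
def pvNorm (c : Char) : Char := if c = '.' ∨ c = 'B' then c else 'H'

def pvIsNorm (c : Char) : Bool := c = '.' || c = 'B' || c = 'H'

-- scan form of s.replace('BH','B!') (afterB = previous output char was 'B')
def repBHf : Bool → List Char → List Char
  | _, [] => []
  | b, c :: rest =>
    if c = 'H' then (if b then '!' else 'H') :: repBHf false rest
    else c :: repBHf (c = 'B') rest

-- scan form of u.replace('H.H','X')
def repHH : List Char → List Char
  | [] => []
  | c :: rest =>
    if c = 'H' ∧ rest.head? = some '.' ∧ rest.tail.head? = some 'H' then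
      'X' :: repHH rest.tail.tail
    else c :: repHH rest
termination_by l => l.length
decreasing_by all_goals (simp [List.length_tail]; try omega)

-- feasibility scan: pvBad safe t = some hamster in t has no feedable neighbour
-- (safe = the char left of t is '.' or 'B')
def pvBad : Bool → List Char → Bool
  | _, [] => false
  | safe, c :: rest =>
    if c = 'H' then ((!safe && !(rest.head? == some '.')) || pvBad false rest)
    else pvBad true rest

def pvCnt (t : List Char) : Int := (t.count 'H' : Int) + (t.count 'X' : Int)

def pvC (afterB : Bool) (t : List Char) : Int := pvCnt (repHH (repBHf afterB t))

-- ---------- A = loopB (invariant: mutated cells vs state machine) ----------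
lemma loop_eq (s : List Char) : ∀ (k : Nat) (l : List Char) (i : Nat)
    (left : Option Char) (pend : Bool) (res : Int),
    s.length - i ≤ k →
    l.length = s.length →
    (∀ j, i < j → l.getD j ' ' = s.getD j ' ') →
    (i < s.length → l.getD i ' ' = (if pend then 'B' else s.getD i ' ')) →
    (match left with
     | none => i = 0
     | some ch => 0 < i ∧ l.getD (i - 1) ' ' = ch) →
    loopA l i res = loopB (s.drop i) left pend res := by
  intro k
  induction k with
  | zero =>
    intro l i left pend res hk hlen _ _ _
    have hge : s.length ≤ i := by omega
    rw [loopA, dif_neg (by omega), List.drop_eq_nil_of_le hge, loopB]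
  | succ k ih =>
    intro l i left pend res hk hlen hge hi hleft
    by_cases hlt : i < s.length
    · have hdrop : s.drop i = s.getD i ' ' :: s.drop (i + 1) := by
        rw [List.drop_eq_getElem_cons hlt, List.getD_eq_getElem s ' ' hlt]
      have hci : l.getD i ' ' = (if pend then 'B' else s.getD i ' ') := hi hlt
      rw [loopA, dif_pos (by omega), hdrop, loopB]
      simp only [hci]
      have hhead : (s.drop (i + 1)).head? = s[i + 1]? := by
        rw [List.head?_drop]
      set eff := (if pend then 'B' else s.getD i ' ') with heff
      by_cases h1 : eff = '.' ∨ eff = 'B'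
      · rw [if_pos h1, if_pos (h1.elim Or.inl (fun h => Or.inr (Or.inl h)))]
        exact ih l (i + 1) (some eff) false res (by omega) hlen
          (fun j hj => hge j (by omega))
          (fun h => by rw [hge (i + 1) (by omega)]; simp)
          ⟨by omega, by simpa using hci⟩
      · have hLB : (0 < i ∧ l.getD (i - 1) ' ' = 'B') ↔ left = some 'B' := by
          cases left with
          | none => simp; intro h; omega
          | some ch => simp only [Option.some.injEq]; constructor
                       · rintro ⟨_, h⟩; rw [← hleft.2, h]
                       · rintro rfl; exact ⟨hleft.1, hleft.2⟩
        rw [if_neg h1]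
        by_cases h2 : left = some 'B'
        · rw [if_pos (hLB.mpr h2), if_pos (Or.inr (Or.inr h2))]
          exact ih l (i + 1) (some eff) false res (by omega) hlen
            (fun j hj => hge j (by omega))
            (fun h => by rw [hge (i + 1) (by omega)]; simp)
            ⟨by omega, hci⟩
        · rw [if_neg (fun h => h2 (hLB.mp h)),
              if_neg (show ¬(eff = '.' ∨ eff = 'B' ∨ left = some 'B') from
                fun h => h.elim (fun h => h1 (Or.inl h))
                  (fun h => h.elim (fun h => h1 (Or.inr h)) h2))]
          have hread1 : l.getD (i + 1) ' ' = s.getD (i + 1) ' ' := hge (i + 1) (by omega)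
          by_cases h3 : i + 1 < s.length ∧ s.getD (i + 1) ' ' = '.'
          · have hh : (s.drop (i + 1)).head? = some '.' := by
              rw [hhead, List.getElem?_eq_getElem h3.1, ← List.getD_eq_getElem s ' ' h3.1, h3.2]
            rw [if_pos ⟨by omega, by rw [hread1]; exact h3.2⟩, if_pos hh]
            refine ih (l.set (i + 1) 'B') (i + 1) (some eff) true (res + 1) (by omega)
              (by simpa using hlen) (fun j hj => ?_) (fun h => ?_) ⟨by omega, ?_⟩
            · rw [List.getD, List.getElem?_set_ne (by omega), ← List.getD]
              exact hge j (by omega)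
            · rw [if_pos rfl, List.getD, List.getElem?_set_self (by omega)]; rfl
            · simp only [Nat.add_sub_cancel]
              rw [List.getD, List.getElem?_set_ne (by omega), ← List.getD, hci]
          · have hh : ¬ (s.drop (i + 1)).head? = some '.' := by
              rw [hhead]; intro hc
              rcases List.getElem?_eq_some_iff.mp hc with ⟨hl, hv⟩
              exact h3 ⟨hl, by rw [List.getD_eq_getElem s ' ' hl, hv]⟩
            rw [if_neg (by rw [hread1]; intro hc; exact h3 ⟨by omega, hc.2⟩), if_neg hh]
            have hLD : (0 < i ∧ l.getD (i - 1) ' ' = '.') ↔ left = some '.' := by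
              cases left with
              | none => simp; intro h; omega
              | some ch => simp only [Option.some.injEq]; constructor
                           · rintro ⟨_, h⟩; rw [← hleft.2, h]
                           · rintro rfl; exact ⟨hleft.1, hleft.2⟩
            by_cases h4 : left = some '.'
            · rw [if_pos (hLD.mpr h4), if_pos h4]
              refine ih (l.set (i - 1) 'B') (i + 1) (some eff) false (res + 1) (by omega)
                (by simpa using hlen) (fun j hj => ?_) (fun h => ?_) ⟨by omega, ?_⟩
              · rw [List.getD, List.getElem?_set_ne (by omega), ← List.getD]
                exact hge j (by omega)
              · rw [List.getD, List.getElem?_set_ne (by omega), ← List.getD]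
                rw [hge (i + 1) (by omega)]; simp
              · simp only [Nat.add_sub_cancel]
                have hne : i - 1 ≠ i := by have := (hLD.mpr h4).1; omega
                rw [List.getD, List.getElem?_set_ne hne, ← List.getD, hci]
            · rw [if_neg (fun h => h4 (hLD.mp h)), if_neg h4]
    · rw [loopA, dif_neg (by omega), List.drop_eq_nil_of_le (by omega), loopB]

-- ---------- loopB only looks at chars through {'.','B'} tests: normalize ----------
lemma pvNorm_dot (a : Char) : pvNorm a = '.' ↔ a = '.' := by
  unfold pvNorm; split_ifs with h
  · exact Iff.rfl
  · push Not at h; constructor <;> intro h' <;> simp_all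

lemma pvNorm_B (a : Char) : pvNorm a = 'B' ↔ a = 'B' := by
  unfold pvNorm; split_ifs with h
  · exact Iff.rfl
  · push Not at h; constructor <;> intro h' <;> simp_all

lemma map_pvNorm_some_dot (l : Option Char) : l.map pvNorm = some '.' ↔ l = some '.' := by
  cases l <;> simp [pvNorm_dot]

lemma map_pvNorm_some_B (l : Option Char) : l.map pvNorm = some 'B' ↔ l = some 'B' := by
  cases l <;> simp [pvNorm_B]

lemma head_map_pvNorm_dot (r : List Char) : (r.map pvNorm).head? = some '.' ↔ r.head? = some '.' := by
  cases r <;> simp [pvNorm_dot]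

lemma loopB_norm : ∀ (s : List Char) (left : Option Char) (pend : Bool) (res : Int),
    loopB s left pend res = loopB (s.map pvNorm) (left.map pvNorm) pend res := by
  intro s
  induction s with
  | nil => intro left pend res; rfl
  | cons c rest ih =>
    intro left pend res
    have heff : (if pend then 'B' else pvNorm c) = pvNorm (if pend then 'B' else c) := by
      cases pend <;> simp [pvNorm]
    have hmapped : (some (pvNorm (if pend then 'B' else c))) =
        (some (if pend then 'B' else c)).map pvNorm := rfl
    rw [List.map_cons, loopB, loopB]
    simp only [heff, pvNorm_dot, pvNorm_B, map_pvNorm_some_B, map_pvNorm_some_dot,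
      head_map_pvNorm_dot]
    split_ifs <;> first | rfl | exact ih _ _ _

-- ---------- scan forms vs PySem.Chars.replace / count ----------
lemma repBHf_true_eq (t : List Char) (h : t.head? ≠ some 'H') :
    repBHf true t = repBHf false t := by
  cases t with
  | nil => rfl
  | cons d r =>
    simp only [List.head?_cons, ne_eq, Option.some.injEq] at h
    simp [repBHf, h]

lemma repBHf_false_cons (c : Char) (t : List Char) (h : ¬(c = 'B' ∧ t.head? = some 'H')) :
    repBHf false (c :: t) = c :: repBHf false t := by
  by_cases hc : c = 'H'
  · simp [repBHf, hc]
  · by_cases hb : c = 'B'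
    · subst hb
      simp only [repBHf, if_neg (by decide : ¬ ('B' : Char) = 'H'), decide_true]
      rw [repBHf_true_eq t (fun hh => h ⟨rfl, hh⟩)]
    · simp [repBHf, hc, hb]

lemma repBH_go : ∀ (fuel : Nat) (l acc : List Char), l.length ≤ fuel →
    PySem.Chars.replace.go ['B', 'H'] ['B', '!'] fuel l acc = acc.reverse ++ repBHf false l := by
  intro fuel
  induction fuel with
  | zero =>
    intro l acc h
    have hl : l = [] := List.length_eq_zero_iff.mp (by omega)
    subst hl
    simp [PySem.Chars.replace.go, repBHf]
  | succ fuel ih =>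
    intro l acc h
    cases l with
    | nil => simp [PySem.Chars.replace.go, repBHf]
    | cons c t =>
      rw [PySem.Chars.replace.go]
      by_cases hp : (['B', 'H'] : List Char).isPrefixOf (c :: t)
      · rw [if_pos hp]
        rcases t with _ | ⟨d, t2⟩
        · simp [List.isPrefixOf] at hp
        · simp only [List.isPrefixOf, Bool.and_eq_true, beq_iff_eq,
            List.isPrefixOf_nil_left, and_true] at hp
          obtain ⟨h1, h2⟩ := hp
          subst h1; subst h2
          simp only [List.length_cons] at h
          rw [show (['B', 'H'] : List Char).length = 2 from rfl]
          rw [show List.drop 2 ('B' :: 'H' :: t2) = t2 from rfl]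
          rw [ih t2 _ (by omega)]
          simp [repBHf]
      · rw [if_neg hp]
        rw [ih t _ (by simp at h; omega)]
        have hcond : ¬(c = 'B' ∧ t.head? = some 'H') := by
          rintro ⟨rfl, hh⟩
          rcases t with _ | ⟨d, t2⟩
          · simp at hh
          · simp only [List.head?_cons, Option.some.injEq] at hh
            subst hh
            exact hp (by simp [List.isPrefixOf])
        rw [repBHf_false_cons c t hcond]
        simp

lemma repHH_go : ∀ (fuel : Nat) (l acc : List Char), l.length ≤ fuel →
    PySem.Chars.replace.go ['H', '.', 'H'] ['X'] fuel l acc = acc.reverse ++ repHH l := by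
  intro fuel
  induction fuel with
  | zero =>
    intro l acc h
    have hl : l = [] := List.length_eq_zero_iff.mp (by omega)
    subst hl
    simp [PySem.Chars.replace.go, repHH]
  | succ fuel ih =>
    intro l acc h
    cases l with
    | nil => simp [PySem.Chars.replace.go, repHH]
    | cons c t =>
      rw [PySem.Chars.replace.go]
      by_cases hp : (['H', '.', 'H'] : List Char).isPrefixOf (c :: t)
      · rw [if_pos hp]
        rcases t with _ | ⟨d, t2⟩
        · simp [List.isPrefixOf] at hp
        · rcases t2 with _ | ⟨e, t3⟩
          · simp [List.isPrefixOf] at hp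
          · simp only [List.isPrefixOf, Bool.and_eq_true, beq_iff_eq,
              List.isPrefixOf_nil_left, and_true] at hp
            obtain ⟨h1, h2, h3⟩ := hp
            subst h1; subst h2; subst h3
            simp only [List.length_cons] at h
            rw [show (['H', '.', 'H'] : List Char).length = 3 from rfl]
            rw [show List.drop 3 ('H' :: '.' :: 'H' :: t3) = t3 from rfl]
            rw [ih t3 _ (by omega)]
            rw [repHH, if_pos (by simp)]
            simp
      · rw [if_neg hp]
        rw [ih t _ (by simp at h; omega)]
        have hcond : ¬(c = 'H' ∧ t.head? = some '.' ∧ t.tail.head? = some 'H') := by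
          rintro ⟨rfl, h1, h2⟩
          rcases t with _ | ⟨d, t2⟩
          · simp at h1
          · simp only [List.head?_cons, Option.some.injEq] at h1
            subst h1
            rcases t2 with _ | ⟨e, t3⟩
            · simp at h2
            · simp only [List.tail_cons, List.head?_cons, Option.some.injEq] at h2
              subst h2
              exact hp (by simp [List.isPrefixOf])
        rw [repHH, if_neg hcond]
        simp

lemma count_go (c : Char) : ∀ (fuel : Nat) (l : List Char) (acc : Nat), l.length ≤ fuel →
    PySem.Chars.count.go [c] fuel l acc = acc + l.count c := by
  intro fuel
  induction fuel with
  | zero =>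
    intro l acc h
    have hl : l = [] := List.length_eq_zero_iff.mp (by omega)
    subst hl
    simp [PySem.Chars.count.go]
  | succ fuel ih =>
    intro l acc h
    cases l with
    | nil => simp [PySem.Chars.count.go]
    | cons d t =>
      rw [PySem.Chars.count.go]
      by_cases hp : ([c] : List Char).isPrefixOf (d :: t)
      · rw [if_pos hp]
        simp only [List.isPrefixOf, Bool.and_eq_true, beq_iff_eq,
          List.isPrefixOf_nil_left, and_true] at hp
        subst hp
        rw [show ([c] : List Char).length = 1 from rfl]
        rw [show List.drop 1 (c :: t) = t from rfl]
        rw [ih t _ (by simp at h; omega)]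
        simp [List.count_cons]
        omega
      · rw [if_neg hp]
        simp only [List.isPrefixOf, Bool.and_eq_true, beq_iff_eq,
          List.isPrefixOf_nil_left, and_true] at hp
        have hd : ¬ d = c := fun he => hp he.symm
        rw [ih t _ (by simp at h; omega)]
        simp [List.count_cons, hd]

-- ---------- unfolding lemmas for the scan functions ----------
lemma loopB_cons_false (c : Char) (rest : List Char) (left : Option Char) (res : Int) :
    loopB (c :: rest) left false res =
      if c = '.' ∨ c = 'B' ∨ left = some 'B' then loopB rest (some c) false res
      else if rest.head? = some '.' then loopB rest (some c) true (res + 1)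
      else if left = some '.' then loopB rest (some c) false (res + 1)
      else -1 := rfl

lemma loopB_cons_pend (c : Char) (rest : List Char) (left : Option Char) (res : Int) :
    loopB (c :: rest) left true res = loopB rest (some 'B') false res := by
  rw [loopB]
  norm_num

lemma pvBad_cons_ne (b : Bool) (c : Char) (r : List Char) (h : ¬ c = 'H') :
    pvBad b (c :: r) = pvBad true r := by
  rw [pvBad, if_neg h]

lemma pvBad_cons_H (b : Bool) (r : List Char) :
    pvBad b ('H' :: r) = ((!b && !(r.head? == some '.')) || pvBad false r) := by
  rw [pvBad, if_pos rfl]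

lemma repBHf_cons_dot (b : Bool) (r : List Char) :
    repBHf b ('.' :: r) = '.' :: repBHf false r := by
  rw [repBHf]; simp

lemma repBHf_cons_B (b : Bool) (r : List Char) :
    repBHf b ('B' :: r) = 'B' :: repBHf true r := by
  rw [repBHf]; simp

lemma repBHf_cons_H (b : Bool) (r : List Char) :
    repBHf b ('H' :: r) = (if b then '!' else 'H') :: repBHf false r := by
  rw [repBHf]; simp

lemma repBHf_head (b : Bool) (r : List Char) (h : r.head? ≠ some 'H') :
    (repBHf b r).head? = r.head? := by
  cases r with
  | nil => rfl
  | cons d r2 =>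
    simp only [List.head?_cons, ne_eq, Option.some.injEq] at h
    rw [repBHf, if_neg h]
    rfl

lemma repBHf_head_dot (b : Bool) (r : List Char) :
    ((repBHf b r).head? = some '.') ↔ (r.head? = some '.') := by
  cases r with
  | nil => simp [repBHf]
  | cons d r2 =>
    by_cases hd : d = 'H'
    · subst hd
      rw [repBHf_cons_H]
      cases b <;> simp
    · rw [repBHf, if_neg hd]
      simp

lemma repHH_cons_ne (c : Char) (u : List Char) (h : ¬ c = 'H') :
    repHH (c :: u) = c :: repHH u := by
  rw [repHH, if_neg (fun hh => h hh.1)]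

lemma repHH_cons_H (u : List Char) (h : u.head? ≠ some '.') :
    repHH ('H' :: u) = 'H' :: repHH u := by
  rw [repHH, if_neg (fun hh => h hh.2.1)]

lemma repHH_cons_HD (u : List Char) (h : u.head? ≠ some 'H') :
    repHH ('H' :: '.' :: u) = 'H' :: '.' :: repHH u := by
  rw [repHH, if_neg (by rintro ⟨-, -, hh⟩; simp only [List.tail_cons] at hh; exact h hh)]
  rw [repHH_cons_ne '.' u (by decide)]

lemma repHH_triple (u : List Char) :
    repHH ('H' :: '.' :: 'H' :: u) = 'X' :: repHH u := by
  rw [repHH, if_pos (by simp)]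
  rfl

lemma pvCnt_cons_other (c : Char) (v : List Char) (h1 : ¬ c = 'H') (h2 : ¬ c = 'X') :
    pvCnt (c :: v) = pvCnt v := by
  simp [pvCnt, List.count_cons, h1, h2]

lemma pvCnt_cons_H (v : List Char) : pvCnt ('H' :: v) = 1 + pvCnt v := by
  simp [pvCnt, List.count_cons]
  omega

lemma pvCnt_cons_X (v : List Char) : pvCnt ('X' :: v) = 1 + pvCnt v := by
  simp [pvCnt, List.count_cons]
  omega

-- pvC step equations
lemma pvC_nil (b : Bool) : pvC b [] = 0 := by cases b <;> simp [pvC, repBHf, repHH, pvCnt]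

lemma pvC_cons_dot (b : Bool) (r : List Char) : pvC b ('.' :: r) = pvC false r := by
  unfold pvC
  rw [repBHf_cons_dot, repHH_cons_ne '.' _ (by decide),
    pvCnt_cons_other '.' _ (by decide) (by decide)]

lemma pvC_cons_B (b : Bool) (r : List Char) : pvC b ('B' :: r) = pvC true r := by
  unfold pvC
  rw [repBHf_cons_B, repHH_cons_ne 'B' _ (by decide),
    pvCnt_cons_other 'B' _ (by decide) (by decide)]

lemma pvC_cons_H_fed (r : List Char) : pvC true ('H' :: r) = pvC false r := by
  unfold pvC
  rw [repBHf_cons_H, if_pos rfl, repHH_cons_ne '!' _ (by decide),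
    pvCnt_cons_other '!' _ (by decide) (by decide)]

lemma pvC_cons_H_lone (r : List Char) (h : r.head? ≠ some '.') :
    pvC false ('H' :: r) = 1 + pvC false r := by
  unfold pvC
  rw [repBHf_cons_H, if_neg (by simp),
    repHH_cons_H _ (fun hh => h ((repBHf_head_dot false r).mp hh)), pvCnt_cons_H]

lemma pvC_cons_HD (r : List Char) (h : r.head? ≠ some 'H') :
    pvC false ('H' :: '.' :: r) = 1 + pvC true r := by
  unfold pvC
  rw [repBHf_cons_H, if_neg (by simp), repBHf_cons_dot,
    ← repBHf_true_eq r h,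
    repHH_cons_HD _ (by rw [repBHf_head true r h]; exact h), pvCnt_cons_H,
    pvCnt_cons_other '.' _ (by decide) (by decide)]

lemma pvC_cons_pair (r : List Char) : pvC false ('H' :: '.' :: 'H' :: r) = 1 + pvC false r := by
  unfold pvC
  rw [repBHf_cons_H, if_neg (by simp), repBHf_cons_dot, repBHf_cons_H, if_neg (by simp),
    repHH_triple, pvCnt_cons_X]

-- ---------- the master equivalence on normalized strings ----------
lemma master : ∀ (n : Nat) (t : List Char), t.length ≤ n → t.all pvIsNorm = true →
    ∀ (l : Option Char) (res : Int),
      (l = none ∨ l = some '.' ∨ l = some 'B' ∨ l = some 'H') →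
      loopB t l false res =
        if pvBad (l = some '.' || l = some 'B') t then -1
        else res + pvC (l = some 'B') t := by
  intro n
  induction n with
  | zero =>
    intro t ht _ l res _
    have h0 : t = [] := List.length_eq_zero_iff.mp (by omega)
    subst h0
    simp [loopB, pvBad, pvC_nil]
  | succ n ih =>
    intro t ht hnorm l res hl
    cases t with
    | nil => simp [loopB, pvBad, pvC_nil]
    | cons c rest =>
      simp only [List.all_cons, Bool.and_eq_true] at hnorm
      obtain ⟨hc, hrest⟩ := hnorm
      simp only [List.length_cons] at ht
      have hc3 : c = '.' ∨ c = 'B' ∨ c = 'H' := by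
        simpa [pvIsNorm, or_assoc] using hc
      rw [loopB_cons_false]
      rcases hc3 with rfl | rfl | rfl
      · -- c = '.'
        rw [if_pos (Or.inl rfl)]
        rw [ih rest (by omega) hrest (some '.') res (by simp)]
        rw [pvBad_cons_ne _ '.' rest (by decide), pvC_cons_dot]
        simp
      · -- c = 'B'
        rw [if_pos (Or.inr (Or.inl rfl))]
        rw [ih rest (by omega) hrest (some 'B') res (by simp)]
        rw [pvBad_cons_ne _ 'B' rest (by decide), pvC_cons_B]
        simp
      · -- c = 'H'
        by_cases hlb : l = some 'B'
        · -- hamster already fed by the bucket on its left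
          subst hlb
          rw [if_pos (Or.inr (Or.inr rfl))]
          rw [ih rest (by omega) hrest (some 'H') res (by simp)]
          rw [pvBad_cons_H]
          simp [pvC_cons_H_fed]
        · rw [if_neg (by rintro (h | h | h) <;> simp_all)]
          have hsafe : (decide (l = some '.') || decide (l = some 'B'))
              = decide (l = some '.') := by
            simp [hlb]
          have hb0 : decide (l = some 'B') = false := by simp [hlb]
          by_cases hh : rest.head? = some '.'
          · -- bucket placed to the right
            rw [if_pos hh]
            obtain ⟨rest2, rfl⟩ : ∃ r2, rest = '.' :: r2 := by
              cases rest with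
              | nil => simp at hh
              | cons d r2 => exact ⟨r2, by simp_all⟩
            rw [loopB_cons_pend]
            have hrest2 : rest2.all pvIsNorm = true := by
              simp only [List.all_cons, Bool.and_eq_true] at hrest
              exact hrest.2
            by_cases hh2 : rest2.head? = some 'H'
            · -- shared-bucket triple H.H
              obtain ⟨rest3, rfl⟩ : ∃ r3, rest2 = 'H' :: r3 := by
                cases rest2 with
                | nil => simp at hh2
                | cons d r3 => exact ⟨r3, by simp_all⟩
              rw [loopB_cons_false, if_pos (Or.inr (Or.inr rfl))]
              have hrest3 : rest3.all pvIsNorm = true := by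
                simp only [List.all_cons, Bool.and_eq_true] at hrest2
                exact hrest2.2
              rw [ih rest3 (by simp only [List.length_cons] at ht; omega) hrest3 (some 'H') (res + 1) (by simp)]
              rw [pvBad_cons_H, hsafe]
              rw [show (('.' :: 'H' :: rest3).head? == some '.') = true by simp]
              rw [pvBad_cons_ne _ '.' _ (by decide), pvBad_cons_H true]
              rw [hb0, pvC_cons_pair]
              simp only [Bool.not_true, Bool.and_false, Bool.false_or, Bool.not_false,
                Bool.true_and]
              split_ifs <;> simp_all <;> omega
            · -- bucket is not shared
              rw [ih rest2 (by simp only [List.length_cons] at ht; omega) hrest2 (some 'B') (res + 1) (by simp)]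
              rw [pvBad_cons_H, hsafe]
              rw [show (('.' :: rest2).head? == some '.') = true by simp]
              rw [pvBad_cons_ne _ '.' _ (by decide)]
              rw [hb0, pvC_cons_HD rest2 hh2]
              simp only [Bool.not_true, Bool.and_false, Bool.false_or]
              split_ifs <;> simp_all <;> omega
          · -- no '.' to the right
            rw [if_neg hh]
            by_cases hld : l = some '.'
            · -- bucket placed to the left
              subst hld
              rw [if_pos rfl]
              rw [ih rest (by omega) hrest (some 'H') (res + 1) (by simp)]
              rw [pvBad_cons_H, hsafe, hb0, pvC_cons_H_lone rest hh]
              rw [show (rest.head? == some '.') = false by simpa using hh]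
              simp only [decide_true, Bool.not_true, Bool.and_false, Bool.false_or]
              split_ifs <;> simp_all <;> omega
            · -- nothing can feed this hamster: -1 on both sides
              rw [if_neg hld]
              rw [pvBad_cons_H, hsafe]
              rw [show decide (l = some '.') = false by simp [hld]]
              rw [show (rest.head? == some '.') = false by simpa using hh]
              simp

-- ---------- feasibility scan vs the indexed any() ----------
lemma bad_iff : ∀ (t : List Char) (safe : Bool),
    (pvBad safe t = true ↔ ∃ k, k < t.length ∧ t.getD k ' ' = 'H' ∧
      ((k = 0 ∧ safe = false) ∨ (0 < k ∧ t.getD (k - 1) ' ' = 'H')) ∧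
      (k = t.length - 1 ∨ t.getD (k + 1) ' ' ≠ '.')) := by
  intro t
  induction t with
  | nil => intro safe; simp [pvBad]
  | cons c rest ih =>
    intro safe
    by_cases hcH : c = 'H'
    · subst hcH
      rw [pvBad_cons_H]
      simp only [Bool.or_eq_true, Bool.and_eq_true, Bool.not_eq_true', beq_eq_false_iff_ne,
        ne_eq, Bool.not_eq_true]
      constructor
      · rintro (⟨hs, hr⟩ | h)
        · refine ⟨0, by simp, by simp, Or.inl ⟨rfl, hs⟩, ?_⟩
          cases rest with
          | nil => exact Or.inl (by simp)
          | cons d r2 =>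
            refine Or.inr ?_
            simp only [List.head?_cons, Option.some.injEq] at hr
            simpa using hr
        · obtain ⟨k, hk, h1, h2, h3⟩ := (ih false).mp h
          refine ⟨k + 1, by simp; omega, by simpa using h1, ?_, ?_⟩
          · refine Or.inr ⟨by omega, ?_⟩
            rcases h2 with ⟨rfl, -⟩ | ⟨hk0, hH⟩
            · simp
            · have : k + 1 - 1 = (k - 1) + 1 := by omega
              rw [this]
              simpa using hH
          · rcases h3 with h3 | h3
            · exact Or.inl (by simp; omega)
            · exact Or.inr (by simpa using h3)
      · rintro ⟨k, hk, h1, h2, h3⟩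
        cases k with
        | zero =>
          left
          rcases h2 with ⟨-, hs⟩ | ⟨h0, -⟩
          · refine ⟨hs, ?_⟩
            rcases h3 with h3 | h3
            · have : rest = [] := by
                simp only [List.length_cons] at h3
                exact List.length_eq_zero_iff.mp (by omega)
              subst this; simp
            · cases rest with
              | nil => simp
              | cons d r2 =>
                simp only [List.head?_cons, ne_eq, Option.some.injEq]
                simpa using h3
          · omega
        | succ k =>
          right
          refine (ih false).mpr ⟨k, by simp at hk; omega, by simpa using h1, ?_, ?_⟩
          · rcases Nat.eq_zero_or_pos k with rfl | hk0
            · exact Or.inl ⟨rfl, rfl⟩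
            · refine Or.inr ⟨hk0, ?_⟩
              rcases h2 with ⟨h, -⟩ | ⟨-, hH⟩
              · omega
              · have : k + 1 - 1 = (k - 1) + 1 := by omega
                rw [this] at hH
                simpa using hH
          · rcases h3 with h3 | h3
            · exact Or.inl (by simp at h3 hk ⊢; omega)
            · exact Or.inr (by simpa using h3)
    · rw [pvBad_cons_ne _ _ _ hcH, ih true]
      constructor
      · rintro ⟨k, hk, h1, h2, h3⟩
        rcases h2 with ⟨-, h⟩ | ⟨hk0, hH⟩
        · simp at h
        · refine ⟨k + 1, by simp; omega, by simpa using h1, ?_, ?_⟩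
          · refine Or.inr ⟨by omega, ?_⟩
            have : k + 1 - 1 = (k - 1) + 1 := by omega
            rw [this]
            simpa using hH
          · rcases h3 with h3 | h3
            · exact Or.inl (by simp; omega)
            · exact Or.inr (by simpa using h3)
      · rintro ⟨k, hk, h1, h2, h3⟩
        cases k with
        | zero => exact absurd (by simpa using h1) hcH
        | succ k =>
          refine ⟨k, by simp at hk; omega, by simpa using h1, ?_, ?_⟩
          · rcases h2 with ⟨h, -⟩ | ⟨-, hH⟩
            · omega
            · rcases Nat.eq_zero_or_pos k with rfl | hk0
              · exact absurd (by simpa using hH) hcH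
              · refine Or.inr ⟨hk0, ?_⟩
                have : k + 1 - 1 = (k - 1) + 1 := by omega
                rw [this] at hH
                simpa using hH
          · rcases h3 with h3 | h3
            · exact Or.inl (by simp at h3 hk ⊢; omega)
            · exact Or.inr (by simpa using h3)

lemma any_eq_bad (s : List Char) :
    ((PySem.List.enumerate s 0).any (fun ic =>
        ic.2 == 'H' && (ic.1 == 0 || PySem.List.pyGetD s (ic.1 - 1) ' ' == 'H')
          && (ic.1 == (s.length : Int) - 1 || !(PySem.List.pyGetD s (ic.1 + 1) ' ' == '.'))))
      = pvBad false s := by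
  rw [Bool.eq_iff_iff, List.any_eq_true, bad_iff s false]
  constructor
  · rintro ⟨p, hp, hf⟩
    rw [PySem.List.mem_enumerate_iff] at hp
    obtain ⟨k, hk, rfl⟩ := hp
    simp only [zero_add, Bool.and_eq_true, beq_iff_eq, Bool.or_eq_true, Bool.not_eq_true'] at hf
    obtain ⟨⟨h1, h2⟩, h3⟩ := hf
    refine ⟨k, hk, by rw [List.getD_eq_getElem _ _ hk]; exact h1, ?_, ?_⟩
    · rcases h2 with h2 | h2
      · exact Or.inl ⟨by exact_mod_cast h2, rfl⟩
      · rcases Nat.eq_zero_or_pos k with rfl | hk0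
        · exact Or.inl ⟨rfl, rfl⟩
        · refine Or.inr ⟨hk0, ?_⟩
          rw [show (k : Int) - 1 = ((k - 1 : Nat) : Int) by omega,
            PySem.List.pyGetD_natCast] at h2
          exact h2
    · rcases h3 with h3 | h3
      · exact Or.inl (by omega)
      · refine Or.inr ?_
        rw [show (k : Int) + 1 = ((k + 1 : Nat) : Int) by omega,
          PySem.List.pyGetD_natCast] at h3
        simpa using h3
  · rintro ⟨k, hk, h1, h2, h3⟩
    refine ⟨((k : Int), s[k]), ?_, ?_⟩
    · rw [PySem.List.mem_enumerate_iff]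
      exact ⟨k, hk, by simp⟩
    · simp only [Bool.and_eq_true, beq_iff_eq, Bool.or_eq_true, Bool.not_eq_true']
      refine ⟨⟨by rw [List.getD_eq_getElem _ _ hk] at h1; exact h1, ?_⟩, ?_⟩
      · rcases h2 with ⟨rfl, -⟩ | ⟨hk0, hH⟩
        · exact Or.inl rfl
        · refine Or.inr ?_
          rw [show (k : Int) - 1 = ((k - 1 : Nat) : Int) by omega,
            PySem.List.pyGetD_natCast]
          exact hH
      · rcases h3 with rfl | h3
        · exact Or.inl (by push_cast; omega)
        · refine Or.inr ?_
          rw [show (k : Int) + 1 = ((k + 1 : Nat) : Int) by omega,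
            PySem.List.pyGetD_natCast]
          simpa using h3

-- ===== VERDICT (by name: the statement is the Claim_ definition above) =====
theorem minimumBuckets_spec : Claim_equal_minimumBuckets := by
  intro hamsters _
  unfold Spec_minimumBuckets minimumBuckets minimumBuckets_alt
  simp only [show (fun c => if c = '.' ∨ c = 'B' then c else 'H') = pvNorm from rfl]
  have hA : loopA hamsters.toList 0 0 = loopB hamsters.toList none false 0 := by
    have := loop_eq hamsters.toList hamsters.toList.length hamsters.toList 0 none false 0
      (by omega) rfl (fun j _ => rfl) (fun _ => rfl) rfl
    simpa using this
  rw [hA, loopB_norm]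
  simp only [Option.map_none]
  have hnorm : (hamsters.toList.map pvNorm).all pvIsNorm = true := by
    rw [List.all_map]
    refine List.all_eq_true.mpr (fun c _ => ?_)
    by_cases h : c = '.' ∨ c = 'B' <;> simp [Function.comp, pvNorm, pvIsNorm, h]
  rw [master (hamsters.toList.map pvNorm).length _ le_rfl hnorm none 0 (Or.inl rfl)]
  show (if pvBad false (hamsters.toList.map pvNorm) = true then (-1 : Int)
    else 0 + pvC false (hamsters.toList.map pvNorm)) = _
  rw [any_eq_bad]
  have hrep1 : PySem.Chars.replace (hamsters.toList.map pvNorm) ['B', 'H'] ['B', '!']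
      = repBHf false (hamsters.toList.map pvNorm) := by
    rw [PySem.Chars.replace, if_neg (by decide)]
    simpa using repBH_go (hamsters.toList.map pvNorm).length (hamsters.toList.map pvNorm) []
      le_rfl
  rw [hrep1]
  have hrep2 : PySem.Chars.replace (repBHf false (hamsters.toList.map pvNorm)) ['H', '.', 'H']
      ['X'] = repHH (repBHf false (hamsters.toList.map pvNorm)) := by
    rw [PySem.Chars.replace, if_neg (by decide)]
    simpa using repHH_go (repBHf false (hamsters.toList.map pvNorm)).length
      (repBHf false (hamsters.toList.map pvNorm)) [] le_rfl
  rw [hrep2]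
  have hcntH : PySem.Chars.count (repHH (repBHf false (hamsters.toList.map pvNorm))) ['H']
      = (repHH (repBHf false (hamsters.toList.map pvNorm))).count 'H' := by
    rw [PySem.Chars.count, if_neg (by decide)]
    simpa using count_go 'H' (repHH (repBHf false (hamsters.toList.map pvNorm))).length
      (repHH (repBHf false (hamsters.toList.map pvNorm))) 0 le_rfl
  have hcntX : PySem.Chars.count (repHH (repBHf false (hamsters.toList.map pvNorm))) ['X']
      = (repHH (repBHf false (hamsters.toList.map pvNorm))).count 'X' := by
    rw [PySem.Chars.count, if_neg (by decide)]
    simpa using count_go 'X' (repHH (repBHf false (hamsters.toList.map pvNorm))).length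
      (repHH (repBHf false (hamsters.toList.map pvNorm))) 0 le_rfl
  rw [hcntH, hcntX]
  split_ifs
  · rfl
  · simp [pvC, pvCnt]
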